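-- pv_equiv track=rewrite | github.com/Jennie421/6.009 | q1_practice_b/quiz.py | minimum_pegs
-- ===== SOURCE A (Python) =====
-- def minimum_pegs(board):
--     m = sum(board) # The min number of pegs is never greater than the number of 1s
--     for i in range(len(board) - 2):
--         if board[i : i + 3] == (0, 1, 1):
--             new_board = board[:i] + (1, 0, 0) + board[i + 3:]
--             m = min(m, minimum_pegs(new_board))
--         elif board[i : i + 3] == (1, 1, 0):
--             new_board = board[:i] + (0, 0, 1) + board[i + 3:]
--             m = min(m, minimum_pegs(new_board))
--
--     return m
-- ===== SOURCE B (Python) =====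
-- def moves(b):
--     # all boards reachable from b by one jump, scanning left to right
--     out = []
--     for i in range(len(b) - 2):
--         if b[i:i + 3] == (0, 1, 1):
--             out.append(b[:i] + (1, 0, 0) + b[i + 3:])
--         elif b[i:i + 3] == (1, 1, 0):
--             out.append(b[:i] + (0, 0, 1) + b[i + 3:])
--     return out
--
--
-- def next_level(level):
--     # deduplicated set of all one-jump successors of the boards in level
--     nxt = set()
--     for b in level:
--         for s in moves(b):
--             nxt.add(s)
--     return nxt
--
--
-- def minimum_pegs(board):
--     # Every jump lowers the board sum by exactly 1, so the minimum reachable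
--     # sum is sum(board) minus the length of a longest jump sequence.  Explore
--     # the reachable states breadth-first, one deduplicated frontier per depth.
--     level = {board}
--     depth = 0
--     while True:
--         nxt = next_level(level)
--         if not nxt:
--             return sum(board) - depth
--         level = nxt
--         depth += 1
-- ===== Notes on version B (the rewrite author's own statement) =====
-- stated objective: alternative
-- what changed: B replaces A's top-down min-over-recursive-calls with an iterative breadth-first search: since every jump lowers the board sum by exactly 1, B advances a deduplicated frontier of reachable states level by level and returns sum(board) minus the depth of the last nonempty level.
import Mathlib
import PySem

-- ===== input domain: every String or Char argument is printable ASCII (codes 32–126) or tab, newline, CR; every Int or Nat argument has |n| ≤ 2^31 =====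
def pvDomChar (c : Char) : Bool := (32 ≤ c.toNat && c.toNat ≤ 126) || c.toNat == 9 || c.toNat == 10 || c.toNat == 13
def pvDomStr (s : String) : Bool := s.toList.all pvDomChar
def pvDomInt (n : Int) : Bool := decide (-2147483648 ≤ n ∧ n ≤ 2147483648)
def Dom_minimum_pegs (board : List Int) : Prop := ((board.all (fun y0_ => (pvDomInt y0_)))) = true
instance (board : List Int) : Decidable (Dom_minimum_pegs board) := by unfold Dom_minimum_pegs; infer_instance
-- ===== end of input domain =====

-- Alternative implementation: B replaces A's min-over-recursive-calls by an iterative breadth-first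
-- search over deduplicated frontiers (a jump lowers the sum by exactly 1, so the
-- answer is sum(board) minus the depth of the last nonempty level).


-- ===== PORT A =====
-- Splitting lemma both ports' termination proofs rely on: if the slice b[i:i+3]
-- equals a 3-element pattern, b decomposes as prefix ++ pattern ++ suffix.
lemma pv_split (b pat : List Int) (i : Int)
    (h : PySem.List.slice b (some i) (some (i + 3)) = pat) (hlen : pat.length = 3) :
    b = PySem.List.slice b none (some i) ++ pat
        ++ PySem.List.slice b (some (i + 3)) none := by
  have hlen' : (PySem.List.slice b (some i) (some (i + 3))).length = 3 := by rw [h, hlen]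
  rw [PySem.List.length_slice] at hlen'
  have hle : PySem.List.clampIdx b.length (i + 3)
      = PySem.List.clampIdx b.length i + 3 := by omega
  have e1 : PySem.List.slice b none (some i)
      = b.take (PySem.List.clampIdx b.length i) := by
    simp [PySem.List.slice]
  have e2 : PySem.List.slice b (some i) (some (i + 3))
      = (b.drop (PySem.List.clampIdx b.length i)).take 3 := by
    simp [PySem.List.slice, hle]
  have e3 : PySem.List.slice b (some (i + 3)) none
      = b.drop (PySem.List.clampIdx b.length (i + 3)) := PySem.List.slice_some_none b (i + 3)
  have hdd : (b.drop (PySem.List.clampIdx b.length i)).drop 3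
      = b.drop (PySem.List.clampIdx b.length (i + 3)) := by
    rw [hle, List.drop_drop]
    try rw [Nat.add_comm]
  rw [e1, e3, ← h, e2]
  conv_lhs => rw [← List.take_append_drop (PySem.List.clampIdx b.length i) b]
  rw [List.append_assoc]
  congr 1
  rw [← hdd]
  exact (List.take_append_drop 3 _).symm

-- a jump replaces two pegs in the slice by one, so the count of 1-cells drops
lemma pv_count_jump (b rep pat : List Int) (i : Int)
    (h : PySem.List.slice b (some i) (some (i + 3)) = pat)
    (hlen : pat.length = 3) (hc : rep.count 1 + 1 = pat.count 1) :
    (PySem.List.slice b none (some i) ++ rep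
        ++ PySem.List.slice b (some (i + 3)) none).count 1 < b.count 1 := by
  conv_rhs => rw [pv_split b pat i h hlen]
  simp only [List.count_append]
  omega

mutual
-- literal transliteration of A: m = sum(board); for i in range(len(board)-2): jump → recurse
def minimum_pegs (board : List Int) : Int :=
  pvALoop board (PySem.List.pyRange 0 ((board.length : Int) - 2) 1) board.sum
  termination_by (board.count 1, board.length + 1)
  decreasing_by
  · apply Prod.Lex.right
    rw [PySem.List.length_pyRange_one]
    omega

-- the 'for i in range(len(board) - 2)' loop of A, folded as recursion over the index list
def pvALoop (board : List Int) (idxs : List Int) (m : Int) : Int :=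
  match idxs with
  | [] => m
  | i :: rest =>
    if h1 : PySem.List.slice board (some i) (some (i + 3)) = [0, 1, 1] then
      pvALoop board rest (min m (minimum_pegs
        (PySem.List.slice board none (some i) ++ [1, 0, 0]
          ++ PySem.List.slice board (some (i + 3)) none)))
    else if h2 : PySem.List.slice board (some i) (some (i + 3)) = [1, 1, 0] then
      pvALoop board rest (min m (minimum_pegs
        (PySem.List.slice board none (some i) ++ [0, 0, 1]
          ++ PySem.List.slice board (some (i + 3)) none)))
    else
      pvALoop board rest m
  termination_by (board.count 1, idxs.length)
  decreasing_by
  · apply Prod.Lex.left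
    exact pv_count_jump board [1, 0, 0] [0, 1, 1] i h1 rfl (by decide)
  · apply Prod.Lex.right
    exact Nat.lt_succ_self _
  · apply Prod.Lex.left
    exact pv_count_jump board [0, 0, 1] [1, 1, 0] i h2 rfl (by decide)
  · apply Prod.Lex.right
    exact Nat.lt_succ_self _
  · apply Prod.Lex.right
    exact Nat.lt_succ_self _
end

-- ===== PORT B =====
-- moves(b): the list of boards reachable from b by one jump, left to right
def pvMoves (b : List Int) : List (List Int) :=
  (PySem.List.pyRange 0 ((b.length : Int) - 2) 1).foldl
    (fun out i =>
      if PySem.List.slice b (some i) (some (i + 3)) = [0, 1, 1] then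
        out ++ [PySem.List.slice b none (some i) ++ [1, 0, 0]
          ++ PySem.List.slice b (some (i + 3)) none]
      else if PySem.List.slice b (some i) (some (i + 3)) = [1, 1, 0] then
        out ++ [PySem.List.slice b none (some i) ++ [0, 0, 1]
          ++ PySem.List.slice b (some (i + 3)) none]
      else out) []

-- next_level(level): nxt = set(); for b in level: for s in moves(b): nxt.add(s)
def pvNext (level : PySem.Set (List Int)) : PySem.Set (List Int) :=
  level.foldl (fun s b => (pvMoves b).foldl PySem.Set.add s) PySem.Set.empty

-- ---- facts the BFS loop's termination proof cites ----
lemma pv_mem_foldl_add (x : List Int) (l : List (List Int)) (s : PySem.Set (List Int)) :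
    x ∈ l.foldl PySem.Set.add s ↔ x ∈ s ∨ x ∈ l := by
  induction l generalizing s with
  | nil => simp
  | cons a t ih =>
    simp [List.foldl_cons, ih, PySem.Set.mem_add, or_assoc, or_comm, or_left_comm]

lemma pv_mem_next (x : List Int) (level : PySem.Set (List Int)) :
    x ∈ pvNext level ↔ ∃ b ∈ level, x ∈ pvMoves b := by
  unfold pvNext
  have gen : ∀ (l : List (List Int)) (s : PySem.Set (List Int)),
      x ∈ l.foldl (fun s b => (pvMoves b).foldl PySem.Set.add s) s
        ↔ x ∈ s ∨ ∃ b ∈ l, x ∈ pvMoves b := by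
    intro l
    induction l with
    | nil => simp
    | cons a t ih =>
      intro s
      simp [List.foldl_cons, ih, pv_mem_foldl_add, or_assoc]
  rw [gen]
  simp [PySem.Set.empty]

-- every element of moves(b) arises from a matched 3-slice of b
lemma pv_mem_moves (x b : List Int) (hx : x ∈ pvMoves b) :
    ∃ i : Int,
      (PySem.List.slice b (some i) (some (i + 3)) = [0, 1, 1]
        ∧ x = PySem.List.slice b none (some i) ++ [1, 0, 0]
            ++ PySem.List.slice b (some (i + 3)) none)
      ∨ (PySem.List.slice b (some i) (some (i + 3)) = [1, 1, 0]
        ∧ x = PySem.List.slice b none (some i) ++ [0, 0, 1]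
            ++ PySem.List.slice b (some (i + 3)) none) := by
  unfold pvMoves at hx
  have gen : ∀ (idxs : List Int) (acc : List (List Int)),
      x ∈ idxs.foldl (fun out i =>
        if PySem.List.slice b (some i) (some (i + 3)) = [0, 1, 1] then
          out ++ [PySem.List.slice b none (some i) ++ [1, 0, 0]
            ++ PySem.List.slice b (some (i + 3)) none]
        else if PySem.List.slice b (some i) (some (i + 3)) = [1, 1, 0] then
          out ++ [PySem.List.slice b none (some i) ++ [0, 0, 1]
            ++ PySem.List.slice b (some (i + 3)) none]
        else out) acc →
      x ∈ acc ∨ ∃ i : Int,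
        (PySem.List.slice b (some i) (some (i + 3)) = [0, 1, 1]
          ∧ x = PySem.List.slice b none (some i) ++ [1, 0, 0]
              ++ PySem.List.slice b (some (i + 3)) none)
        ∨ (PySem.List.slice b (some i) (some (i + 3)) = [1, 1, 0]
          ∧ x = PySem.List.slice b none (some i) ++ [0, 0, 1]
              ++ PySem.List.slice b (some (i + 3)) none) := by
    intro idxs
    induction idxs with
    | nil => intro acc h; exact Or.inl h
    | cons i rest ih =>
      intro acc h
      rw [List.foldl_cons] at h
      rcases ih _ h with hacc | hex
      · split_ifs at hacc with h1 h2
        · rcases List.mem_append.1 hacc with hl | hr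
          · exact Or.inl hl
          · exact Or.inr ⟨i, Or.inl ⟨h1, List.mem_singleton.1 hr⟩⟩
        · rcases List.mem_append.1 hacc with hl | hr
          · exact Or.inl hl
          · exact Or.inr ⟨i, Or.inr ⟨h2, List.mem_singleton.1 hr⟩⟩
        · exact Or.inl hacc
      · exact Or.inr hex
  rcases gen _ _ hx with h | h
  · exact absurd h (List.not_mem_nil)
  · exact h

lemma pv_move_count (x b : List Int) (hx : x ∈ pvMoves b) : x.count 1 < b.count 1 := by
  rcases pv_mem_moves x b hx with ⟨i, ⟨h1, hx1⟩ | ⟨h2, hx2⟩⟩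
  · rw [hx1]; exact pv_count_jump b [1, 0, 0] [0, 1, 1] i h1 rfl (by decide)
  · rw [hx2]; exact pv_count_jump b [0, 0, 1] [1, 1, 0] i h2 rfl (by decide)

-- generic facts about the foldr-max of a mapped list
lemma pv_le_fold (f : List Int → Nat) (l : List (List Int)) (a : List Int) (ha : a ∈ l) :
    f a ≤ (l.map f).foldr max 0 := by
  induction l with
  | nil => cases ha
  | cons x t ih =>
    rcases List.mem_cons.1 ha with rfl | ht
    · simp [List.foldr_cons]
    · simp only [List.map_cons, List.foldr_cons]
      exact le_trans (ih ht) (le_max_right _ _)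

lemma pv_fold_attain (f : List Int → Nat) (l : List (List Int)) (hl : l ≠ []) :
    ∃ a ∈ l, (l.map f).foldr max 0 = f a := by
  induction l with
  | nil => exact absurd rfl hl
  | cons x t ih =>
    cases t with
    | nil => exact ⟨x, List.mem_cons_self, by simp⟩
    | cons y u =>
      rcases ih (by simp) with ⟨a, ha, hEq⟩
      rcases le_total (f x) (((y :: u).map f).foldr max 0) with h | h
      · refine ⟨a, List.mem_cons_of_mem _ ha, ?_⟩
        simp only [List.map_cons, List.foldr_cons] at hEq h ⊢
        rw [max_eq_right h]
        exact hEq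
      · refine ⟨x, List.mem_cons_self, ?_⟩
        simp only [List.map_cons, List.foldr_cons] at h ⊢
        exact max_eq_left h

-- the BFS measure: the largest count of 1-cells over the frontier
def pvMeas (level : List (List Int)) : Nat :=
  (level.map (fun b => b.count 1)).foldr max 0

lemma pv_meas_lt (level : PySem.Set (List Int)) (h : pvNext level ≠ []) :
    pvMeas (pvNext level) < pvMeas level := by
  rcases pv_fold_attain (fun b => b.count 1) (pvNext level) h with ⟨x, hx, hEq⟩
  rcases (pv_mem_next x level).1 hx with ⟨b, hb, hxb⟩
  calc pvMeas (pvNext level) = x.count 1 := hEq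
    _ < b.count 1 := pv_move_count x b hxb
    _ ≤ pvMeas level := pv_le_fold (fun b => b.count 1) level b hb

-- the 'while True' loop of B: advance the frontier until no jump is possible
def pvBLoop (s0 : Int) (level : PySem.Set (List Int)) (depth : Int) : Int :=
  if _h : pvNext level = ([] : List (List Int)) then s0 - depth
  else pvBLoop s0 (pvNext level) (depth + 1)
  termination_by pvMeas level
  decreasing_by
  · exact pv_meas_lt level _h

def minimum_pegs_alt (board : List Int) : Int :=
  pvBLoop board.sum (PySem.Set.ofList [board]) 0

-- ===== PRECONDITION & SPEC =====
def Spec_minimum_pegs (board : List Int) (out : Int) : Prop := out = minimum_pegs_alt board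
instance (board : List Int) (out : Int) : Decidable (Spec_minimum_pegs board out) := by unfold Spec_minimum_pegs; infer_instance

-- ===== CLAIM (what is proved, stated in full; the proofs are below) =====
def Claim_equal_minimum_pegs : Prop := ∀ (board : List Int), Dom_minimum_pegs board → Spec_minimum_pegs board (minimum_pegs board)

-- ===== LEMMAS AND PROOFS =====

lemma pv_fold_le (f : List Int → Nat) (l : List (List Int)) (c : Nat)
    (h : ∀ a ∈ l, f a ≤ c) : (l.map f).foldr max 0 ≤ c := by
  induction l with
  | nil => simp
  | cons x t ih =>
    simp only [List.map_cons, List.foldr_cons, max_le_iff]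
    exact ⟨h x List.mem_cons_self, ih fun a ha => h a (List.mem_cons_of_mem _ ha)⟩

-- a jump lowers the board sum by exactly 1
lemma pv_move_sum (x b : List Int) (hx : x ∈ pvMoves b) : x.sum = b.sum - 1 := by
  rcases pv_mem_moves x b hx with ⟨i, ⟨h1, hx1⟩ | ⟨h2, hx2⟩⟩
  · conv_rhs => rw [pv_split b [0, 1, 1] i h1 rfl]
    rw [hx1]; simp only [List.sum_append]; simp; omega
  · conv_rhs => rw [pv_split b [1, 1, 0] i h2 rfl]
    rw [hx2]; simp only [List.sum_append]; simp; omega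

-- the longest-jump-sequence depth of a board
def pvD (b : List Int) : Nat :=
  ((pvMoves b).attach.map (fun s => pvD s.1 + 1)).foldr max 0
  termination_by b.count 1
  decreasing_by
  · exact pv_move_count s.1 b s.2

lemma pvD_eq (b : List Int) :
    pvD b = ((pvMoves b).map (fun s => pvD s + 1)).foldr max 0 := by
  rw [pvD]
  congr 1
  simp

-- unfolding equations for the well-founded definitions
lemma pvMin_def (board : List Int) :
    minimum_pegs board
      = pvALoop board (PySem.List.pyRange 0 ((board.length : Int) - 2) 1) board.sum := by
  rw [minimum_pegs.eq_def]

lemma pvALoop_nil (board : List Int) (m : Int) : pvALoop board [] m = m := by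
  rw [pvALoop.eq_def]

lemma pvALoop_cons (board : List Int) (i : Int) (rest : List Int) (m : Int) :
    pvALoop board (i :: rest) m =
      if _h1 : PySem.List.slice board (some i) (some (i + 3)) = [0, 1, 1] then
        pvALoop board rest (min m (minimum_pegs
          (PySem.List.slice board none (some i) ++ [1, 0, 0]
            ++ PySem.List.slice board (some (i + 3)) none)))
      else if _h2 : PySem.List.slice board (some i) (some (i + 3)) = [1, 1, 0] then
        pvALoop board rest (min m (minimum_pegs
          (PySem.List.slice board none (some i) ++ [0, 0, 1]
            ++ PySem.List.slice board (some (i + 3)) none)))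
      else
        pvALoop board rest m := by
  rw [pvALoop.eq_def]

lemma pvBLoop_def (s0 : Int) (level : PySem.Set (List Int)) (depth : Int) :
    pvBLoop s0 level depth =
      if pvNext level = ([] : List (List Int)) then s0 - depth
      else pvBLoop s0 (pvNext level) (depth + 1) := by
  rw [pvBLoop.eq_def]
  split <;> rfl

-- A's index loop collects exactly the moves of pvMoves (restricted to its index list)
def pvMovesL (b : List Int) (idxs : List Int) : List (List Int) :=
  match idxs with
  | [] => []
  | i :: rest =>
    (if PySem.List.slice b (some i) (some (i + 3)) = [0, 1, 1] then
      [PySem.List.slice b none (some i) ++ [1, 0, 0]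
        ++ PySem.List.slice b (some (i + 3)) none]
    else if PySem.List.slice b (some i) (some (i + 3)) = [1, 1, 0] then
      [PySem.List.slice b none (some i) ++ [0, 0, 1]
        ++ PySem.List.slice b (some (i + 3)) none]
    else []) ++ pvMovesL b rest

lemma pvMovesL_cons (b : List Int) (i : Int) (rest : List Int) :
    pvMovesL b (i :: rest) =
      (if PySem.List.slice b (some i) (some (i + 3)) = [0, 1, 1] then
        [PySem.List.slice b none (some i) ++ [1, 0, 0]
          ++ PySem.List.slice b (some (i + 3)) none]
      else if PySem.List.slice b (some i) (some (i + 3)) = [1, 1, 0] then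
        [PySem.List.slice b none (some i) ++ [0, 0, 1]
          ++ PySem.List.slice b (some (i + 3)) none]
      else []) ++ pvMovesL b rest := by
  rw [pvMovesL]

lemma pvMoves_eq_movesL (b : List Int) :
    pvMoves b = pvMovesL b (PySem.List.pyRange 0 ((b.length : Int) - 2) 1) := by
  unfold pvMoves
  have gen : ∀ (idxs acc : List _),
      idxs.foldl (fun out i =>
        if PySem.List.slice b (some i) (some (i + 3)) = [0, 1, 1] then
          out ++ [PySem.List.slice b none (some i) ++ [1, 0, 0]
            ++ PySem.List.slice b (some (i + 3)) none]
        else if PySem.List.slice b (some i) (some (i + 3)) = [1, 1, 0] then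
          out ++ [PySem.List.slice b none (some i) ++ [0, 0, 1]
            ++ PySem.List.slice b (some (i + 3)) none]
        else out) acc = acc ++ pvMovesL b idxs := by
    intro idxs
    induction idxs with
    | nil => intro acc; simp [pvMovesL]
    | cons i rest ih =>
      intro acc
      rw [List.foldl_cons, ih, pvMovesL_cons]
      split_ifs <;> simp [List.append_assoc]
  exact gen _ []

lemma pvALoop_eq_fold (b : List Int) (idxs : List Int) (m : Int) :
    pvALoop b idxs m
      = (pvMovesL b idxs).foldl (fun m s => min m (minimum_pegs s)) m := by
  induction idxs generalizing m with
  | nil => rw [pvALoop_nil]; rfl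
  | cons i rest ih =>
    rw [pvALoop_cons, pvMovesL_cons]
    split_ifs with h1 h2 <;> simp [List.foldl_cons, ih]

-- fold of min over moves whose values are S - 1 - pvD s
lemma pv_fold_min (S : Int) (l : List (List Int)) (m : Int) (hm : m ≤ S)
    (h : ∀ s ∈ l, minimum_pegs s = S - 1 - (pvD s : Int)) :
    l.foldl (fun m s => min m (minimum_pegs s)) m
      = min m (S - (((l.map (fun s => pvD s + 1)).foldr max 0 : Nat) : Int)) := by
  induction l generalizing m with
  | nil => simp; omega
  | cons s t ih =>
    rw [List.foldl_cons, h s List.mem_cons_self,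
      ih (min m (S - 1 - (pvD s : Int))) (by omega)
        (fun a ha => h a (List.mem_cons_of_mem _ ha))]
    simp only [List.map_cons, List.foldr_cons]
    push_cast
    omega

-- A computes sum(board) minus the longest-jump-sequence depth
lemma pvA_value : ∀ (n : Nat) (b : List Int), b.count 1 ≤ n →
    minimum_pegs b = b.sum - (pvD b : Int) := by
  intro n
  induction n with
  | zero =>
    intro b hb
    have hmv : pvMoves b = [] := by
      by_contra h
      rcases List.exists_mem_of_ne_nil _ h with ⟨x, hx⟩
      have := pv_move_count x b hx
      omega
    rw [pvMin_def, pvALoop_eq_fold, ← pvMoves_eq_movesL, hmv, pvD_eq, hmv]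
    simp
  | succ n ih =>
    intro b hb
    by_cases hle : b.count 1 ≤ n
    · exact ih b hle
    · rw [pvMin_def, pvALoop_eq_fold, ← pvMoves_eq_movesL,
        pv_fold_min b.sum (pvMoves b) b.sum le_rfl
          (fun s hs => by
            rw [ih s (by have := pv_move_count s b hs; omega), pv_move_sum s b hs]),
        pvD_eq]
      omega

-- B's loop returns s0 - depth - (depth of the frontier)
lemma pvB_value : ∀ (n : Nat) (level : PySem.Set (List Int)), pvMeas level ≤ n →
    level ≠ [] → ∀ (s0 depth : Int),
    pvBLoop s0 level depth = s0 - depth - (((level.map pvD).foldr max 0 : Nat) : Int) := by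
  intro n
  induction n using Nat.strong_induction_on with
  | _ n ih =>
    intro level hn hne s0 depth
    rw [pvBLoop_def]
    by_cases hnx : pvNext level = ([] : List (List Int))
    · rw [if_pos hnx]
      have hz : (level.map pvD).foldr max 0 = 0 := by
        apply Nat.le_zero.1
        apply pv_fold_le
        intro b hb
        have hmv : pvMoves b = [] := by
          by_contra h
          rcases List.exists_mem_of_ne_nil _ h with ⟨x, hx⟩
          have : x ∈ pvNext level := (pv_mem_next x level).2 ⟨b, hb, hx⟩
          rw [hnx] at this
          exact absurd this (List.not_mem_nil)
        rw [pvD_eq, hmv]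
        simp
      rw [hz]
      simp
    · rw [if_neg hnx]
      have hlt := pv_meas_lt level hnx
      have hrec := ih (pvMeas (pvNext level)) (by omega) (pvNext level) le_rfl hnx
        s0 (depth + 1)
      rw [hrec]
      -- the frontier depth drops by exactly 1 per level
      have hMDle : (level.map pvD).foldr max 0
          ≤ ((pvNext level).map pvD).foldr max 0 + 1 := by
        apply pv_fold_le
        intro b hb
        rw [pvD_eq]
        apply pv_fold_le
        intro s hs
        have := pv_le_fold pvD (pvNext level) s ((pv_mem_next s level).2 ⟨b, hb, hs⟩)
        omega
      have hMDge : ((pvNext level).map pvD).foldr max 0 + 1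
          ≤ (level.map pvD).foldr max 0 := by
        rcases pv_fold_attain pvD (pvNext level) hnx with ⟨x, hx, hEq⟩
        rcases (pv_mem_next x level).1 hx with ⟨b, hb, hxb⟩
        have h1 : pvD x + 1 ≤ pvD b := by
          rw [pvD_eq b]
          exact pv_le_fold (fun s => pvD s + 1) (pvMoves b) x hxb
        have h2 := pv_le_fold pvD level b hb
        omega
      have hstep : (level.map pvD).foldr max 0
          = ((pvNext level).map pvD).foldr max 0 + 1 := by omega
      rw [hstep]
      push_cast
      ring

-- ===== VERDICT (by name: the statement is the Claim_ definition above) =====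
theorem minimum_pegs_spec : Claim_equal_minimum_pegs := by
  intro board _
  show minimum_pegs board = minimum_pegs_alt board
  unfold minimum_pegs_alt
  have hof : PySem.Set.ofList [board] = [board] := by
    simp [PySem.Set.ofList, PySem.Set.add, PySem.Set.empty]
  rw [hof, pvB_value (pvMeas [board]) [board] le_rfl (by simp) board.sum 0,
    pvA_value (board.count 1) board le_rfl]
  simp
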